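-- pv_equiv track=rewrite | github.com/SKNETWORKS-FAMILY-AICAMP/SKN25-4th-4Team | backend/ingestion/crawl_pubmed.py | _evidence_priority
-- ===== SOURCE A (Python) =====
-- def _evidence_priority(pub_types: list[str]) -> str:
--     lowered = {p.lower() for p in pub_types}
--     for label, key in [
--         ("systematic-review", "systematic review"),
--         ("meta-analysis", "meta-analysis"),
--         ("rct", "randomized controlled trial"),
--         ("clinical-trial", "clinical trial"),
--         ("review", "review"),
--     ]:
--         if key in lowered:
--             return label
--     return "other"
-- ===== SOURCE B (Python) =====
-- def _evidence_priority(pub_types: list[str]) -> str: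
--     key_to_rank = {
--         "systematic review": 0,
--         "meta-analysis": 1,
--         "randomized controlled trial": 2,
--         "clinical trial": 3,
--         "review": 4,
--     }
--     rank_to_label = ["systematic-review", "meta-analysis", "rct", "clinical-trial", "review"]
--     best = 5
--     for p in pub_types:
--         r = key_to_rank.get(p.lower(), 5)
--         if r < best:
--             best = r
--     return rank_to_label[best] if best < 5 else "other"
-- ===== Notes on version B (the rewrite author's own statement) =====
-- stated objective: alternative
-- what changed: B iterates over the input publication types once, maintaining a running minimum priority rank via a key-to-rank dict, instead of building a set of lowered strings and scanning the fixed label list for the first match.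
import Mathlib
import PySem

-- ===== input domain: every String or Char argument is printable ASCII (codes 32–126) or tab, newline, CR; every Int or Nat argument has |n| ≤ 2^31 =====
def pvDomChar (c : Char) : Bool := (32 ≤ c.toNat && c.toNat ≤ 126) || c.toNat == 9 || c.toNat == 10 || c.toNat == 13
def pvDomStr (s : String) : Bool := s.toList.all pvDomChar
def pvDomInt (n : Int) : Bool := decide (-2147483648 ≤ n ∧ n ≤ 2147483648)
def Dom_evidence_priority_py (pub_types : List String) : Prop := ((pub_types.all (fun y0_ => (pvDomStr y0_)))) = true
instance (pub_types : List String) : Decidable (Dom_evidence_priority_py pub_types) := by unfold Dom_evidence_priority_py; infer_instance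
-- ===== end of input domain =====

-- B replaces A's set-of-lowered-strings + scan of the fixed label list by a single pass
-- over the input maintaining a running minimum priority rank (alternative decomposition).


-- ===== PORT A =====
def evidence_priority_py (pub_types : List String) : String :=
  let lowered : PySem.Set String := PySem.Set.ofList (pub_types.map PySem.Str.lower)
  if PySem.Set.contains lowered "systematic review" then "systematic-review"
  else if PySem.Set.contains lowered "meta-analysis" then "meta-analysis"
  else if PySem.Set.contains lowered "randomized controlled trial" then "rct"
  else if PySem.Set.contains lowered "clinical trial" then "clinical-trial"
  else if PySem.Set.contains lowered "review" then "review"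
  else "other"

-- ===== PORT B =====
def pvKeyToRank : PySem.Dict String Nat :=
  PySem.Dict.ofList [("systematic review", 0), ("meta-analysis", 1),
    ("randomized controlled trial", 2), ("clinical trial", 3), ("review", 4)]

def pvRankToLabel : List String :=
  ["systematic-review", "meta-analysis", "rct", "clinical-trial", "review"]

def evidence_priority_py_alt (pub_types : List String) : String :=
  let best := pub_types.foldl (fun best p =>
    let r := pvKeyToRank.getD (PySem.Str.lower p) 5
    if r < best then r else best) 5
  if best < 5 then pvRankToLabel.getD best "other" else "other"

-- ===== PRECONDITION & SPEC =====
def Spec_evidence_priority_py (pub_types : List String) (out : String) : Prop := out = evidence_priority_py_alt pub_types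
instance (pub_types : List String) (out : String) : Decidable (Spec_evidence_priority_py pub_types out) := by unfold Spec_evidence_priority_py; infer_instance

-- ===== CLAIM (what is proved, stated in full; the proofs are below) =====
def Claim_equal_evidence_priority_py : Prop := ∀ (pub_types : List String), Dom_evidence_priority_py pub_types → Spec_evidence_priority_py pub_types (evidence_priority_py pub_types)

-- ===== LEMMAS AND PROOFS =====

/-- The rank B's dict lookup assigns to one publication-type string. -/
def pvRank (p : String) : Nat := pvKeyToRank.getD (PySem.Str.lower p) 5

/-- B's loop body, abstracted. -/
def pvStep (b : Nat) (p : String) : Nat := if pvRank p < b then pvRank p else b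

/-- B's accumulated minimum rank starting from the sentinel 5. -/
def pvM (l : List String) : Nat := l.foldl pvStep 5

lemma pvRank_eval (p : String) :
    pvRank p =
      if "systematic review" = PySem.Str.lower p then 0
      else if "meta-analysis" = PySem.Str.lower p then 1
      else if "randomized controlled trial" = PySem.Str.lower p then 2
      else if "clinical trial" = PySem.Str.lower p then 3
      else if "review" = PySem.Str.lower p then 4
      else 5 := by
  have hk : pvKeyToRank = PySem.Dict.mk [("systematic review", 0), ("meta-analysis", 1),
      ("randomized controlled trial", 2), ("clinical trial", 3), ("review", 4)] := by decide
  rw [pvRank, hk]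
  simp only [PySem.Dict.getD_eq_get?_getD, PySem.Dict.get?_mk_cons, beq_iff_eq]
  split_ifs <;> simp [PySem.Dict.get?]

lemma contains_lowered (l : List String) (k : String) :
    PySem.Set.contains (PySem.Set.ofList (l.map PySem.Str.lower)) k
      = l.any (fun p => k == PySem.Str.lower p) := by
  rw [Bool.eq_iff_iff]
  simp only [PySem.Set.contains, List.contains_eq_mem, List.mem_map, decide_eq_true_eq,
    PySem.Set.mem_ofList, List.any_eq_true, beq_iff_eq]
  constructor
  · rintro ⟨p, hp, rfl⟩; exact ⟨p, hp, rfl⟩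
  · rintro ⟨p, hp, rfl⟩; exact ⟨p, hp, rfl⟩

lemma pvStep_eq_min (b : Nat) (p : String) : pvStep b p = min b (pvRank p) := by
  unfold pvStep; split_ifs <;> omega

lemma pvRank_le (p : String) : pvRank p ≤ 5 := by
  rw [pvRank_eval]; split_ifs <;> omega

lemma pvFoldl_min (l : List String) : ∀ b : Nat, b ≤ 5 → l.foldl pvStep b = min b (pvM l) := by
  induction l with
  | nil => intro b hb; simp [pvM]; omega
  | cons p l ih =>
      intro b hb
      have h1 := pvRank_le p
      have hr : pvStep 5 p = pvRank p := by rw [pvStep_eq_min]; omega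
      simp only [pvM, List.foldl_cons]
      rw [hr, ih (pvStep b p) (by rw [pvStep_eq_min]; omega), ih (pvRank p) (by omega),
        pvStep_eq_min]
      omega

lemma pvM_cons (p : String) (l : List String) :
    pvM (p :: l) = min (pvRank p) (pvM l) := by
  have hr : pvStep 5 p = pvRank p := by
    rw [pvStep_eq_min]; have := pvRank_le p; omega
  simp only [pvM, List.foldl_cons]
  rw [hr, pvFoldl_min l (pvRank p) (pvRank_le p)]
  rfl

lemma pvM_le (l : List String) : pvM l ≤ 5 := by
  induction l with
  | nil => simp [pvM]
  | cons p l ih => rw [pvM_cons]; omega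

lemma pvM_attained (l : List String) : pvM l = 5 ∨ ∃ p ∈ l, pvRank p = pvM l := by
  induction l with
  | nil => left; rfl
  | cons p l ih =>
      rw [pvM_cons]
      rcases Nat.le_total (pvRank p) (pvM l) with h | h
      · right; exact ⟨p, List.mem_cons_self .., by omega⟩
      · rcases ih with h5 | ⟨q, hq, hrq⟩
        · left; have := pvRank_le p; omega
        · right; exact ⟨q, List.mem_cons_of_mem _ hq, by omega⟩

lemma pvM_lb (l : List String) : ∀ p ∈ l, pvM l ≤ pvRank p := by
  induction l with
  | nil => simp
  | cons q l ih =>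
      intro p hp
      rw [pvM_cons]
      rcases List.mem_cons.mp hp with rfl | hp
      · omega
      · have := ih p hp; omega

lemma pvRank_eq_zero_iff (p : String) :
    pvRank p = 0 ↔ "systematic review" = PySem.Str.lower p := by
  rw [pvRank_eval]; split_ifs with h0 h1 h2 h3 h4
  · exact iff_of_true rfl h0
  · refine iff_of_false (by decide) h0
  · refine iff_of_false (by decide) h0
  · refine iff_of_false (by decide) h0
  · refine iff_of_false (by decide) h0
  · refine iff_of_false (by decide) h0

lemma pvRank_eq_one_iff (p : String) :
    pvRank p = 1 ↔ "meta-analysis" = PySem.Str.lower p := by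
  rw [pvRank_eval]; split_ifs with h0 h1 h2 h3 h4
  · refine iff_of_false (by decide) (fun he => absurd (h0.trans he.symm) (by decide))
  · exact iff_of_true rfl h1
  · refine iff_of_false (by decide) h1
  · refine iff_of_false (by decide) h1
  · refine iff_of_false (by decide) h1
  · refine iff_of_false (by decide) h1

lemma pvRank_eq_two_iff (p : String) :
    pvRank p = 2 ↔ "randomized controlled trial" = PySem.Str.lower p := by
  rw [pvRank_eval]; split_ifs with h0 h1 h2 h3 h4
  · refine iff_of_false (by decide) (fun he => absurd (h0.trans he.symm) (by decide))
  · refine iff_of_false (by decide) (fun he => absurd (h1.trans he.symm) (by decide))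
  · exact iff_of_true rfl h2
  · refine iff_of_false (by decide) h2
  · refine iff_of_false (by decide) h2
  · refine iff_of_false (by decide) h2

lemma pvRank_eq_three_iff (p : String) :
    pvRank p = 3 ↔ "clinical trial" = PySem.Str.lower p := by
  rw [pvRank_eval]; split_ifs with h0 h1 h2 h3 h4
  · refine iff_of_false (by decide) (fun he => absurd (h0.trans he.symm) (by decide))
  · refine iff_of_false (by decide) (fun he => absurd (h1.trans he.symm) (by decide))
  · refine iff_of_false (by decide) (fun he => absurd (h2.trans he.symm) (by decide))
  · exact iff_of_true rfl h3
  · refine iff_of_false (by decide) h3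
  · refine iff_of_false (by decide) h3

lemma pvRank_eq_four_iff (p : String) :
    pvRank p = 4 ↔ "review" = PySem.Str.lower p := by
  rw [pvRank_eval]; split_ifs with h0 h1 h2 h3 h4
  · refine iff_of_false (by decide) (fun he => absurd (h0.trans he.symm) (by decide))
  · refine iff_of_false (by decide) (fun he => absurd (h1.trans he.symm) (by decide))
  · refine iff_of_false (by decide) (fun he => absurd (h2.trans he.symm) (by decide))
  · refine iff_of_false (by decide) (fun he => absurd (h3.trans he.symm) (by decide))
  · exact iff_of_true rfl h4
  · refine iff_of_false (by decide) h4

lemma pvAny_iff (l : List String) (k : String) (i : Nat)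
    (hk : ∀ p : String, pvRank p = i ↔ k = PySem.Str.lower p) :
    (l.any (fun p => k == PySem.Str.lower p) = true) ↔ ∃ p ∈ l, pvRank p = i := by
  simp only [List.any_eq_true, beq_iff_eq]
  constructor
  · rintro ⟨p, hp, h⟩; exact ⟨p, hp, (hk p).mpr h⟩
  · rintro ⟨p, hp, h⟩; exact ⟨p, hp, (hk p).mp h⟩

lemma pvM_ne_of_no_rank (l : List String) (i : Nat) (hi : i < 5)
    (h : ¬ ∃ p ∈ l, pvRank p = i) : pvM l ≠ i := by
  intro hm
  rcases pvM_attained l with h5 | ⟨p, hp, hr⟩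
  · omega
  · exact h ⟨p, hp, by omega⟩

lemma pvAlt_eq (l : List String) :
    evidence_priority_py_alt l =
      (if pvM l < 5 then pvRankToLabel.getD (pvM l) "other" else "other") := rfl

-- ===== VERDICT (by name: the statement is the Claim_ definition above) =====
theorem evidence_priority_py_spec : Claim_equal_evidence_priority_py := by
  intro l _
  unfold Spec_evidence_priority_py
  rw [pvAlt_eq]
  show (let lowered : PySem.Set String := PySem.Set.ofList (l.map PySem.Str.lower);
    if PySem.Set.contains lowered "systematic review" then "systematic-review"
    else if PySem.Set.contains lowered "meta-analysis" then "meta-analysis"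
    else if PySem.Set.contains lowered "randomized controlled trial" then "rct"
    else if PySem.Set.contains lowered "clinical trial" then "clinical-trial"
    else if PySem.Set.contains lowered "review" then "review"
    else "other") = _
  simp only [contains_lowered]
  by_cases c0 : l.any (fun p => "systematic review" == PySem.Str.lower p) = true
  · obtain ⟨p, hp, hr⟩ := (pvAny_iff l _ 0 pvRank_eq_zero_iff).mp c0
    have hm : pvM l = 0 := by have := pvM_lb l p hp; omega
    rw [hm]; simp [c0, pvRankToLabel]
  · have hne0 := pvM_ne_of_no_rank l 0 (by omega)
      (fun he => c0 ((pvAny_iff l _ 0 pvRank_eq_zero_iff).mpr he))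
    by_cases c1 : l.any (fun p => "meta-analysis" == PySem.Str.lower p) = true
    · obtain ⟨p, hp, hr⟩ := (pvAny_iff l _ 1 pvRank_eq_one_iff).mp c1
      have hm : pvM l = 1 := by have := pvM_lb l p hp; omega
      rw [hm]; simp [c0, c1, pvRankToLabel]
    · have hne1 := pvM_ne_of_no_rank l 1 (by omega)
        (fun he => c1 ((pvAny_iff l _ 1 pvRank_eq_one_iff).mpr he))
      by_cases c2 : l.any (fun p => "randomized controlled trial" == PySem.Str.lower p) = true
      · obtain ⟨p, hp, hr⟩ := (pvAny_iff l _ 2 pvRank_eq_two_iff).mp c2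
        have hm : pvM l = 2 := by have := pvM_lb l p hp; omega
        rw [hm]; simp [c0, c1, c2, pvRankToLabel]
      · have hne2 := pvM_ne_of_no_rank l 2 (by omega)
          (fun he => c2 ((pvAny_iff l _ 2 pvRank_eq_two_iff).mpr he))
        by_cases c3 : l.any (fun p => "clinical trial" == PySem.Str.lower p) = true
        · obtain ⟨p, hp, hr⟩ := (pvAny_iff l _ 3 pvRank_eq_three_iff).mp c3
          have hm : pvM l = 3 := by have := pvM_lb l p hp; omega
          rw [hm]; simp [c0, c1, c2, c3, pvRankToLabel]
        · have hne3 := pvM_ne_of_no_rank l 3 (by omega)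
            (fun he => c3 ((pvAny_iff l _ 3 pvRank_eq_three_iff).mpr he))
          by_cases c4 : l.any (fun p => "review" == PySem.Str.lower p) = true
          · obtain ⟨p, hp, hr⟩ := (pvAny_iff l _ 4 pvRank_eq_four_iff).mp c4
            have hm : pvM l = 4 := by have := pvM_lb l p hp; omega
            rw [hm]; simp [c0, c1, c2, c3, c4, pvRankToLabel]
          · have hne4 := pvM_ne_of_no_rank l 4 (by omega)
              (fun he => c4 ((pvAny_iff l _ 4 pvRank_eq_four_iff).mpr he))
            have hm : pvM l = 5 := by have := pvM_le l; omega
            rw [hm]; simp [c0, c1, c2, c3, c4]
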